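-- pv_equiv track=rewrite | github.com/leomax2002/Algoritmos-e-Programacao-de-Computadores | Teste.py | num_gelo
-- ===== SOURCE A (Python) =====
-- def num_gelo(blocos,n,m):
--     num = 0
--     n = n - 1
--     while m > 0:
--         while m < blocos[n]:
--             n-=1
--         m-= blocos[n]
--         num+=1
--     return num
-- ===== SOURCE B (Python) =====
-- def num_gelo(blocos, n, m):
--     if m <= 0:
--         return 0
--     num = 0
--     for i in range(n - 1, -1, -1):
--         b = blocos[i]
--         if m >= b:
--             num += m // b
--             m %= b
--             if m == 0:
--                 break
--     return num
-- ===== Notes on version B (the rewrite author's own statement) =====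
-- stated objective: faster
-- what changed: Intended as faster (timing: A timed out at n=16 where B returned; no clean ratio measurable): replace A's repeated-subtraction while-loops (one subtraction per counted block) by a single descending index loop that takes each block level at most once using integer division and remainder.
-- outside the precondition, e.g. on num_gelo([5, 1], 1, 3): A returns 3, B returns 0
import Mathlib
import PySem

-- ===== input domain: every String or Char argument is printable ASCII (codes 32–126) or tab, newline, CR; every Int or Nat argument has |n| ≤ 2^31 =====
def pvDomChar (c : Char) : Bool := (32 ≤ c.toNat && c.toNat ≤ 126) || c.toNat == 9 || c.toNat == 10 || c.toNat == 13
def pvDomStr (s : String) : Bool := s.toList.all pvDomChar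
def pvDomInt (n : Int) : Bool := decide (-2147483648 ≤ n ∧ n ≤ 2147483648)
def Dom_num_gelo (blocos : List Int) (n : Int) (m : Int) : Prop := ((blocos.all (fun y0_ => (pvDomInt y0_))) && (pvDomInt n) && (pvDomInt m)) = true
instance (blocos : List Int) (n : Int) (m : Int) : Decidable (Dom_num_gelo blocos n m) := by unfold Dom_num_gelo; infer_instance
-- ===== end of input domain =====

-- B replaces A's repeated subtraction (one loop turn per counted block) by one division per
-- block level scanned downward; intended as faster (a timing run saw A time out at n=16
-- where B returned, but could not measure a ratio). Equality proved on Pre_.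

-- ===== PORT A =====
-- A's nested while-loops, flattened into one fueled step function (each step is one test of the
-- inner guard or one subtraction, exactly as A executes); fuel m.toNat + n.toNat + 1 suffices on
-- Pre_ (each step lowers the index or lowers m by ≥ 1). pyGet? none = IndexError (excluded by Pre_).
def numGeloLoopA (blocos : List Int) : Nat → Int → Int → Int → Int
  | 0, _, _, num => num
  | fuel + 1, i, m, num =>
    if 0 < m then
      match PySem.List.pyGet? blocos i with
      | none => num        -- Python raises IndexError here; outside Pre_
      | some b =>
        if m < b then numGeloLoopA blocos fuel (i - 1) m num
        else numGeloLoopA blocos fuel i (m - b) (num + 1)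
    else num

def num_gelo (blocos : List Int) (n : Int) (m : Int) : Int :=
  numGeloLoopA blocos (m.toNat + n.toNat + 1) (n - 1) m 0

-- ===== PORT B =====
-- B's for-loop over range(n-1, -1, -1) with division, remainder and early break.
def numGeloLoopB (blocos : List Int) : List Int → Int → Int → Int
  | [], _, num => num
  | i :: rest, m, num =>
    match PySem.List.pyGet? blocos i with
    | none => num          -- Python raises IndexError here; outside Pre_
    | some b =>
      if b ≤ m then
        let num' := num + PySem.Int.floordiv m b
        let m' := PySem.Int.mod m b
        if m' = 0 then num' else numGeloLoopB blocos rest m' num'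
      else numGeloLoopB blocos rest m num

def num_gelo_alt (blocos : List Int) (n : Int) (m : Int) : Int :=
  if m ≤ 0 then 0
  else numGeloLoopB blocos (PySem.List.pyRange (n - 1) (-1) (-1)) m 0

-- ===== PRECONDITION & SPEC =====
-- Pre_ excludes inputs where A raises (IndexError after the index runs past -len) or never
-- terminates, and the inputs where A returns a value only via Python's negative-index
-- wraparound (an accidental value, e.g. ([5,1],1,3) → 3); it keeps the natural domain of the
-- greedy block count: a valid index range 0 < n ≤ len, positive blocks among the first n, and
-- the unit block at position 0 (which guarantees A terminates without wrapping), plus every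
-- m ≤ 0 (A returns 0 there without touching blocos).
def Pre_num_gelo (blocos : List Int) (n : Int) (m : Int) : Prop :=
  m ≤ 0 ∨ (0 < n ∧ n ≤ blocos.length ∧ blocos.getD 0 0 = 1 ∧
            ∀ b ∈ blocos.take n.toNat, 1 ≤ b)
instance (blocos : List Int) (n : Int) (m : Int) : Decidable (Pre_num_gelo blocos n m) := by
  unfold Pre_num_gelo; infer_instance

def pvWitness_num_gelo : List Int × Int × Int := ([1, 3, 5], 3, 11)

def Spec_num_gelo (blocos : List Int) (n : Int) (m : Int) (out : Int) : Prop := out = num_gelo_alt blocos n m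
instance (blocos : List Int) (n : Int) (m : Int) (out : Int) : Decidable (Spec_num_gelo blocos n m out) := by unfold Spec_num_gelo; infer_instance

-- ===== CLAIM (what is proved, stated in full; the proofs are below) =====
def Claim_equal_num_gelo : Prop := ∀ (blocos : List Int) (n : Int) (m : Int), Dom_num_gelo blocos n m → Pre_num_gelo blocos n m → Spec_num_gelo blocos n m (num_gelo blocos n m)

-- ===== LEMMAS AND PROOFS =====

-- B's loop is the identity when m ≤ 0 and every index it can reach holds a positive block.
lemma loopB_nonpos (blocos : List Int) :
    ∀ (l : List Int) (m num : Int), m ≤ 0 →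
      (∀ i ∈ l, ∀ b, PySem.List.pyGet? blocos i = some b → 1 ≤ b) →
      numGeloLoopB blocos l m num = num := by
  intro l
  induction l with
  | nil => intro m num _ _; rfl
  | cons i rest ih =>
    intro m num hm hpos
    unfold numGeloLoopB
    cases hg : PySem.List.pyGet? blocos i with
    | none => rfl
    | some b =>
      have hb : 1 ≤ b := hpos i (by simp) b hg
      simp only [if_neg (by omega : ¬ b ≤ m)]
      exact ih m num hm (fun j hj => hpos j (by simp [hj]))

-- One subtraction step of A is absorbed by B's division at the same index.
lemma loopB_absorb (blocos : List Int) (l : List Int) (i m num b : Int)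
    (hg : PySem.List.pyGet? blocos i = some b) (hb : 1 ≤ b) (hbm : b ≤ m)
    (hl : ∀ j ∈ l, ∀ c, PySem.List.pyGet? blocos j = some c → 1 ≤ c) :
    numGeloLoopB blocos (i :: l) m num = numGeloLoopB blocos (i :: l) (m - b) (num + 1) := by
  have hdiv : PySem.Int.floordiv m b = PySem.Int.floordiv (m - b) b + 1 := by
    rw [PySem.Int.floordiv_eq_ediv_of_pos (by omega), PySem.Int.floordiv_eq_ediv_of_pos (by omega)]
    rw [show m = (m - b) + 1 * b by ring, Int.add_mul_ediv_right _ _ (by omega : b ≠ 0)]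
    ring_nf
  have hmod : PySem.Int.mod m b = PySem.Int.mod (m - b) b := by
    rw [PySem.Int.mod_eq_emod_of_pos (by omega), PySem.Int.mod_eq_emod_of_pos (by omega)]
    conv_lhs => rw [show m = (m - b) + 1 * b by ring]
    exact Int.add_mul_emod_self_right _ 1 _
  unfold numGeloLoopB
  rw [hg]
  by_cases h2 : b ≤ m - b
  · simp only [if_pos hbm, if_pos h2, hdiv, hmod]
    ring_nf
  · -- b ≤ m < 2b : one subtraction exhausts the level
    have hd0 : PySem.Int.floordiv (m - b) b = 0 := by
      rw [PySem.Int.floordiv_eq_ediv_of_pos (by omega)]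
      exact Int.ediv_eq_zero_of_lt (by omega) (by omega)
    have hm0 : PySem.Int.mod (m - b) b = m - b := by
      rw [PySem.Int.mod_eq_emod_of_pos (by omega)]
      exact Int.emod_eq_of_lt (by omega) (by omega)
    simp only [if_pos hbm, if_neg h2, hdiv, hmod, hd0, hm0]
    by_cases hz : m - b = 0
    · rw [if_pos hz, hz, loopB_nonpos blocos l 0 (num + 1) le_rfl hl]
      ring_nf
    · rw [if_neg hz]
      ring_nf

-- Main invariant: from any state (index i, remaining m) inside the valid region, A's fueled
-- loop equals B's loop over the remaining indices i, i-1, …, 0.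
lemma loopA_eq_loopB (blocos : List Int) (h1 : blocos.getD 0 0 = 1) :
    ∀ (fuel : Nat) (i m num : Int), 0 ≤ i → i < blocos.length →
      (∀ j : Nat, (hj : j < blocos.length) → (j : Int) ≤ i → 1 ≤ blocos[j]) →
      m.toNat + i.toNat + 1 ≤ fuel →
      numGeloLoopA blocos fuel i m num =
        numGeloLoopB blocos (PySem.List.pyRange i (-1) (-1)) m num := by
  intro fuel
  induction fuel with
  | zero => intro i m num _ _ _ hf; omega
  | succ fuel ih =>
    intro i m num hi0 hilen hpos hf
    have hlen0 : 0 < blocos.length := by omega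
    have hmem : ∀ j ∈ PySem.List.pyRange i (-1) (-1), ∀ b,
        PySem.List.pyGet? blocos j = some b → 1 ≤ b := by
      intro j hj b hg
      have hjr := (PySem.List.mem_pyRange_neg_one).1 hj
      rw [PySem.List.pyGet?_of_nonneg blocos (by omega)] at hg
      have hjl : j.toNat < blocos.length := by
        by_contra h
        rw [List.getElem?_eq_none (by omega)] at hg
        simp at hg
      rw [List.getElem?_eq_getElem hjl] at hg
      have := hpos j.toNat hjl (by omega)
      simp only [Option.some.injEq] at hg
      omega
    by_cases hm : 0 < m
    · have hil : i.toNat < blocos.length := by omega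
      have hg : PySem.List.pyGet? blocos i = some blocos[i.toNat] := by
        rw [PySem.List.pyGet?_of_nonneg blocos hi0, List.getElem?_eq_getElem hil]
      have hb : 1 ≤ blocos[i.toNat] := hpos i.toNat hil (by omega)
      rw [PySem.List.pyRange_neg_one_cons (by omega : (-1 : Int) < i)]
      by_cases hlt : m < blocos[i.toNat]
      · -- A moves the index down; i ≠ 0 because blocos[0] = 1 ≤ m
        have hine : i ≠ 0 := by
          intro h
          rw [List.getD_eq_getElem blocos 0 hlen0] at h1
          subst h
          simp only [Int.toNat_zero] at hlt
          omega
        have hA : numGeloLoopA blocos (fuel + 1) i m num = numGeloLoopA blocos fuel (i - 1) m num := by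
          simp only [numGeloLoopA, if_pos hm, hg, if_pos hlt]
        rw [hA, ih (i - 1) m num (by omega) (by omega)
              (fun j hj hji => hpos j hj (by omega)) (by omega)]
        -- B skips the level: b ≤ m is false, same remaining indices
        have hB : numGeloLoopB blocos (i :: PySem.List.pyRange (i - 1) (-1) (-1)) m num =
            numGeloLoopB blocos (PySem.List.pyRange (i - 1) (-1) (-1)) m num := by
          simp only [numGeloLoopB, hg]
          rw [if_neg (by omega : ¬ blocos[i.toNat] ≤ m)]
        exact hB.symm
      · -- A subtracts once; B's division absorbs it
        have hA : numGeloLoopA blocos (fuel + 1) i m num =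
            numGeloLoopA blocos fuel i (m - blocos[i.toNat]) (num + 1) := by
          simp only [numGeloLoopA, if_pos hm, hg, if_neg hlt]
        rw [hA]
        have hstep := loopB_absorb blocos (PySem.List.pyRange (i - 1) (-1) (-1)) i m num
          blocos[i.toNat] hg hb (by omega)
          (fun j hj c hc => hmem j (by
            rw [PySem.List.pyRange_neg_one_cons (by omega : (-1 : Int) < i)]
            exact List.mem_cons_of_mem _ hj) c hc)
        rw [ih i (m - blocos[i.toNat]) (num + 1) hi0 hilen hpos (by omega)]
        rw [PySem.List.pyRange_neg_one_cons (by omega : (-1 : Int) < i)]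
        exact hstep.symm
    · -- m ≤ 0: both loops return num
      unfold numGeloLoopA
      rw [if_neg hm, loopB_nonpos blocos _ m num (by omega) hmem]

-- ===== VERDICT (by name: the statement is the Claim_ definition above) =====
theorem num_gelo_spec : Claim_equal_num_gelo := by
  intro blocos n m _ hpre
  unfold Spec_num_gelo num_gelo num_gelo_alt
  by_cases hm : m ≤ 0
  · rw [if_pos hm]
    have : ¬ (0 : Int) < m := by omega
    unfold numGeloLoopA
    simp only [if_neg this]
  · rw [if_neg hm]
    rcases hpre with h | ⟨hn0, hnlen, h1, hpos⟩
    · omega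
    · have hpos' : ∀ j : Nat, (hj : j < blocos.length) → (j : Int) ≤ n - 1 → 1 ≤ blocos[j] := by
        intro j hj hjn
        have hjt : j < n.toNat := by omega
        have hjt' : j < (blocos.take n.toNat).length := by
          simp [List.length_take]; omega
        have := hpos (blocos.take n.toNat)[j] (List.getElem_mem hjt')
        rwa [List.getElem_take] at this
      exact loopA_eq_loopB blocos h1 (m.toNat + n.toNat + 1) (n - 1) m 0
        (by omega) (by omega) hpos' (by omega)
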